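-- pv_equiv track=rewrite | github.com/dudamarlena/pyc_source | pycfiles/subtle-0.5.linux-i686.tar/textutils.py | find_first_level_groups_span
-- ===== SOURCE A (Python) =====
-- def find_first_level_groups_span(string, enclosing):
--     """Return a list of pairs (start, end) for the groups delimited by the given
--     enclosing characters.
--     This does not return nested groups, ie: '(ab(c)(d))' will return a single group
--     containing the whole string.
--
--     >>> find_first_level_groups_span('abcd', '()')
--     []
--
--     >>> find_first_level_groups_span('abc(de)fgh', '()')
--     [(3, 7)]
--
--     >>> find_first_level_groups_span('(ab(c)(d))', '()')
--     [(0, 10)]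
--
--     >>> find_first_level_groups_span('ab[c]de[f]gh(i)', '[]')
--     [(2, 5), (7, 10)]
--     """
--     opening, closing = enclosing
--     depth = []
--     result = []
--     for i, c in enumerate(string):
--         if c == opening:
--             depth.append(i)
--         elif c == closing:
--             try:
--                 start = depth.pop()
--                 end = i
--                 if not depth:
--                     result.append((start, end + 1))
--             except IndexError:
--                 pass
--
--     return result
-- ===== SOURCE B (Python) =====
-- def find_first_level_groups_span(string, enclosing):
--     """Nested-scan reformulation: the outer loop hops from one top-level group
--     to the next; an inner scan finds the matching closer for each opener."""
--     opening, closing = enclosing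
--     result = []
--     i = 0
--     n = len(string)
--     while i < n:
--         if string[i] == opening:
--             depth = 1
--             j = i + 1
--             while j < n and depth:
--                 if string[j] == opening:
--                     depth += 1
--                 elif string[j] == closing:
--                     depth -= 1
--                 j += 1
--             if depth == 0:
--                 result.append((i, j))
--             i = j
--         else:
--             i += 1
--     return result
-- ===== Notes on version B (the rewrite author's own statement) =====
-- stated objective: alternative
-- what changed: Replaces the single pass with a stack of opening indices by a nested-scan segmentation: an outer loop hops from one top-level opener to the next and an inner scan finds each opener's matching closer, so no stack (or per-character depth state across groups) is maintained.
import Mathlib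
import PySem

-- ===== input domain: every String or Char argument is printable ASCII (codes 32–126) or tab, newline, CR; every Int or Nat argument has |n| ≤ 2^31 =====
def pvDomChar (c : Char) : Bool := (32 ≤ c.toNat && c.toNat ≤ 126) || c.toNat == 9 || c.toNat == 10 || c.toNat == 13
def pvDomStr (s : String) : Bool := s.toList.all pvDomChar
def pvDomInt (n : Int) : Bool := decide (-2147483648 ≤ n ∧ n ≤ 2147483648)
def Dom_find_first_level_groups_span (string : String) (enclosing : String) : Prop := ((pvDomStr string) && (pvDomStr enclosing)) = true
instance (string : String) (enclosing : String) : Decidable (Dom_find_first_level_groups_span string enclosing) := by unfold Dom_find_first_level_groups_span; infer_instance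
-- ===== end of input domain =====

-- B replaces A's single stack-maintaining pass by a nested-scan segmentation: the outer
-- loop hops from one top-level opener to the next, an inner scan finds its matching
-- closer (objective: alternative decomposition, no stack kept).

-- ===== PORT A =====
-- A's loop: stack 'depth' of opening indices (head = top, push/pop at head, matching
-- Python's append/pop on the list end), accumulating 'result'; the empty-stack pop
-- (IndexError) is the [] branch, which does nothing (the 'except: pass').
def ffgsA_loop (opening closing : Char) : List (Int × Char) → List Int → List (Int × Int) → List (Int × Int)
  | [], _, result => result
  | (i, c) :: rest, depth, result =>
    if c == opening then ffgsA_loop opening closing rest (i :: depth) result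
    else if c == closing then
      match depth with
      | [] => ffgsA_loop opening closing rest [] result
      | start :: d' =>
        ffgsA_loop opening closing rest d'
          (if d' = [] then result ++ [(start, i + 1)] else result)
    else ffgsA_loop opening closing rest depth result

-- 'opening, closing = enclosing' raises unless len(enclosing) == 2 (excluded by Pre_).
def find_first_level_groups_span (string : String) (enclosing : String) : List (Int × Int) :=
  match enclosing.toList with
  | [opening, closing] => ffgsA_loop opening closing (PySem.List.enumerate string.toList) [] []
  | _ => []

-- ===== PORT B =====
-- Source B's inner while loop over indices j = i+1 … , ported as recursion on the remaining
-- enumerated suffix: returns some (j, rest-after-j) when depth reaches 0 (matching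
-- closer found, j = matched position + 1), none when the string runs out first.
def ffgsB_inner (o c : Char) : List (Int × Char) → Int → Option (Int × List (Int × Char))
  | [], _ => none
  | (j, ch) :: rest, depth =>
    let d := if ch == o then depth + 1 else if ch == c then depth - 1 else depth
    if d = 0 then some (j + 1, rest) else ffgsB_inner o c rest d

theorem ffgsB_inner_len (o c : Char) :
    ∀ (l : List (Int × Char)) (d : Int) (j : Int) (r : List (Int × Char)),
      ffgsB_inner o c l d = some (j, r) → r.length < l.length := by
  intro l
  induction l with
  | nil => intro d j r h; simp [ffgsB_inner] at h
  | cons p rest ih =>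
    intro d j r h
    obtain ⟨i, ch⟩ := p
    simp only [ffgsB_inner] at h
    by_cases hz : (if ch == o then d + 1 else if ch == c then d - 1 else d) = 0
    · rw [if_pos hz] at h; cases h; simp
    · rw [if_neg hz] at h; have := ih _ _ _ h; simp; omega

-- Source B's outer while: on a non-opener advance by one; on an opener run the inner scan,
-- emit (i, j) if it matched, and resume after j (the none case has j = n: loop ends).
def ffgsB_outer (o c : Char) : List (Int × Char) → List (Int × Int) → List (Int × Int)
  | [], result => result
  | (i, ch) :: rest, result =>
    if ch == o then
      match h : ffgsB_inner o c rest 1 with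
      | some (j, rest') => ffgsB_outer o c rest' (result ++ [(i, j)])
      | none => result
    else ffgsB_outer o c rest result
termination_by l => l.length
decreasing_by
  · exact Nat.lt_trans (ffgsB_inner_len o c rest 1 _ _ h) (by simp)
  · simp

def find_first_level_groups_span_alt (string : String) (enclosing : String) : List (Int × Int) :=
  let cs := enclosing.toList
  if h : cs.length = 2 then
    ffgsB_outer (cs[0]'(by omega)) (cs[1]'(by omega))
      (PySem.List.enumerate string.toList) []
  else []

-- ===== PRECONDITION & SPEC =====
-- Python's 'opening, closing = enclosing' raises ValueError unless enclosing has exactly 2 characters.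
def Pre_find_first_level_groups_span (string : String) (enclosing : String) : Prop :=
  enclosing.toList.length = 2
instance (string : String) (enclosing : String) : Decidable (Pre_find_first_level_groups_span string enclosing) := by unfold Pre_find_first_level_groups_span; infer_instance
def pvWitness_find_first_level_groups_span : String × String := ("ab[c]de[f]gh(i)", "[]")

def Spec_find_first_level_groups_span (string : String) (enclosing : String) (out : List (Int × Int)) : Prop := out = find_first_level_groups_span_alt string enclosing
instance (string : String) (enclosing : String) (out : List (Int × Int)) : Decidable (Spec_find_first_level_groups_span string enclosing out) := by unfold Spec_find_first_level_groups_span; infer_instance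

-- ===== CLAIM =====
def Claim_equal_find_first_level_groups_span : Prop := ∀ (string : String) (enclosing : String), Dom_find_first_level_groups_span string enclosing → Pre_find_first_level_groups_span string enclosing → Spec_find_first_level_groups_span string enclosing (find_first_level_groups_span string enclosing)

-- ===== LEMMAS AND PROOFS =====

-- Proof-only intermediate: A's loop with the stack replaced by its length (an integer
-- depth counter) plus the tracked bottom element (the first-level start).
def ffgsC_loop (opening closing : Char) : List (Int × Char) → Int → Int → List (Int × Int) → List (Int × Int)
  | [], _, _, result => result
  | (i, c) :: rest, depth, start, result =>
    if c == opening then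
      ffgsC_loop opening closing rest (depth + 1) (if depth = 0 then i else start) result
    else if c == closing then
      if depth > 0 then
        ffgsC_loop opening closing rest (depth - 1) start
          (if depth - 1 = 0 then result ++ [(start, i + 1)] else result)
      else ffgsC_loop opening closing rest depth start result
    else ffgsC_loop opening closing rest depth start result

theorem getLast?_cc (x y : Int) (t : List Int) :
    (x :: y :: t).getLast? = (y :: t).getLast? := by
  simp [List.getLast?_eq_some_getLast]

-- Simulation invariant: C's depth is A's stack length; C's start equals the bottom
-- (last) element of A's stack whenever the stack is nonempty; results coincide.
theorem ffgs_loop_sim (opening closing : Char) (l : List (Int × Char)) :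
    ∀ (stk : List Int) (st : Int) (res : List (Int × Int)),
      (stk ≠ [] → stk.getLast? = some st) →
      ffgsA_loop opening closing l stk res
        = ffgsC_loop opening closing l (stk.length : Int) st res := by
  induction l with
  | nil => intro stk st res _; simp [ffgsA_loop, ffgsC_loop]
  | cons p rest ih =>
    intro stk st res hlast
    obtain ⟨i, c⟩ := p
    by_cases hc : c == opening
    · cases stk with
      | nil =>
        simp only [ffgsA_loop, ffgsC_loop, hc, if_true, List.length_nil,
          Int.natCast_zero]
        simpa using ih [i] i res (fun _ => rfl)
      | cons a t =>
        have hne : ¬((a :: t).length : Int) = 0 := by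
          simp only [List.length_cons]; omega
        simp only [ffgsA_loop, ffgsC_loop, hc, if_true, if_neg hne]
        have hlen : ((i :: a :: t).length : Int) = ((a :: t).length : Int) + 1 := by
          simp only [List.length_cons]; push_cast; ring
        rw [← hlen]
        exact ih (i :: a :: t) st res (fun _ => by
          rw [getLast?_cc]; exact hlast (by simp))
    · by_cases hc2 : c == closing
      · cases stk with
        | nil =>
          have hng : ¬((0:Int) > 0) := by omega
          simp only [ffgsA_loop, ffgsC_loop, hc, hc2, if_false, if_true,
            Bool.false_eq_true, List.length_nil, Int.natCast_zero, if_neg hng]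
          exact ih [] st res (fun h => absurd rfl h)
        | cons a t =>
          have hgt : ((a :: t).length : Int) > 0 := by
            simp only [List.length_cons]; omega
          have hlen : ((a :: t).length : Int) - 1 = (t.length : Int) := by
            simp only [List.length_cons]; push_cast; ring
          cases t with
          | nil =>
            have ha : a = st := by
              have := hlast (by simp)
              simpa [List.getLast?] using this
            subst ha
            simp only [ffgsA_loop, ffgsC_loop, hc, hc2, if_false, if_true,
              Bool.false_eq_true, if_pos hgt, hlen,
              List.length_nil, Int.natCast_zero]
            exact ih [] a (res ++ [(a, i + 1)]) (fun h => absurd rfl h)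
          | cons b t' =>
            have hne1 : b :: t' ≠ ([] : List Int) := by simp
            have hne2 : ¬((b :: t').length : Int) = 0 := by
              simp only [List.length_cons]; omega
            simp only [ffgsA_loop, ffgsC_loop, hc, hc2, if_false, if_true,
              Bool.false_eq_true, if_pos hgt, hlen, if_neg hne1, if_neg hne2]
            exact ih (b :: t') st res (fun _ => by
              have := hlast (by simp)
              rwa [getLast?_cc] at this)
      · simp only [ffgsA_loop, ffgsC_loop, hc, hc2, if_false, Bool.false_eq_true]
        exact ih stk st res hlast

-- C vs B, by strong induction on the list length:
-- at depth 0 the counter loop is B's outer loop; at depth ≥ 1 it is B's inner scan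
-- (emit the span when the scan finds the matching closer, then resume at depth 0).
theorem ffgsC_eq_B (o c : Char) :
    ∀ (n : Nat) (l : List (Int × Char)), l.length ≤ n →
      ∀ (st : Int) (res : List (Int × Int)),
        (ffgsC_loop o c l 0 st res = ffgsB_outer o c l res) ∧
        (∀ d : Int, 1 ≤ d → ffgsC_loop o c l d st res =
          match ffgsB_inner o c l d with
          | some (j, r) => ffgsC_loop o c r 0 st (res ++ [(st, j)])
          | none => res) := by
  intro n
  induction n with
  | zero =>
    intro l hl st res
    have : l = [] := List.eq_nil_of_length_eq_zero (Nat.le_zero.mp hl)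
    subst this
    exact ⟨by simp [ffgsC_loop, ffgsB_outer], fun d _ => by simp [ffgsC_loop, ffgsB_inner]⟩
  | succ n ih =>
    intro l hl st res
    cases l with
    | nil =>
      exact ⟨by simp [ffgsC_loop, ffgsB_outer], fun d _ => by simp [ffgsC_loop, ffgsB_inner]⟩
    | cons p rest =>
      obtain ⟨i, ch⟩ := p
      have hr : rest.length ≤ n := by simp at hl; omega
      constructor
      · -- depth 0 ↔ outer
        by_cases hc : ch == o
        · have h01 : ¬((0:Int) = 0) = False := by simp
          simp only [ffgsC_loop, ffgsB_outer, hc, if_true]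
          have h2 := (ih rest hr i res).2 1 (le_refl 1)
          rw [zero_add, h2]
          cases hinner : ffgsB_inner o c rest 1 with
          | none => simp
          | some v =>
            obtain ⟨j, r⟩ := v
            have hrlen : r.length ≤ n :=
              Nat.le_of_lt_succ (Nat.lt_of_lt_of_le (ffgsB_inner_len o c rest 1 j r hinner) (by omega))
            simp only
            exact (ih r hrlen i (res ++ [(i, j)])).1
        · by_cases hc2 : ch == c
          · have hng : ¬((0:Int) > 0) := by omega
            simp only [ffgsC_loop, ffgsB_outer, hc, hc2, if_false, if_true,
              Bool.false_eq_true, if_neg hng]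
            exact (ih rest hr st res).1
          · simp only [ffgsC_loop, ffgsB_outer, hc, hc2, if_false, Bool.false_eq_true]
            exact (ih rest hr st res).1
      · -- depth ≥ 1 ↔ inner
        intro d hd
        by_cases hc : ch == o
        · have hdne : ¬(d = 0) := by omega
          simp only [ffgsC_loop, ffgsB_inner, hc, if_true, if_neg hdne]
          have hne : ¬(d + 1 = 0) := by omega
          rw [(ih rest hr st res).2 (d + 1) (by omega)]
          simp only [if_neg hne]
        · by_cases hc2 : ch == c
          · have hgt : d > 0 := by omega
            simp only [ffgsC_loop, ffgsB_inner, hc, hc2, if_false, if_true,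
              Bool.false_eq_true, if_pos hgt]
            by_cases hz : d - 1 = 0
            · simp [hz]
            · simp only [if_neg hz]
              exact (ih rest hr st res).2 (d - 1) (by omega)
          · simp only [ffgsC_loop, ffgsB_inner, hc, hc2, if_false, Bool.false_eq_true]
            have := (ih rest hr st res).2 d hd
            have hdne : ¬(d = 0) := by omega
            rw [this]
            simp only [if_neg hdne]
        
-- ===== VERDICT =====
theorem find_first_level_groups_span_spec : Claim_equal_find_first_level_groups_span := by
  intro string enclosing _ hpre
  unfold Pre_find_first_level_groups_span at hpre
  obtain ⟨o, c, h⟩ := List.length_eq_two.mp hpre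
  unfold Spec_find_first_level_groups_span
  unfold find_first_level_groups_span find_first_level_groups_span_alt
  simp only [h, List.length_cons, List.length_nil, dif_pos, List.getElem_cons_zero,
    List.getElem_cons_succ]
  rw [ffgs_loop_sim o c (PySem.List.enumerate string.toList) [] 0 [] (fun h => absurd rfl h)]
  exact (ffgsC_eq_B o c (PySem.List.enumerate string.toList).length _ le_rfl 0 []).1
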